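-- pv_equiv track=rewrite | github.com/vergnetp/shared_libs | python/databases/base2.py | _convert_parameters
-- ===== SOURCE A (Python) =====
-- from typing import Set, Awaitable, Callable, Optional, Tuple, List, Any, Dict, final, Union, ClassVar, Final, AsyncIterator, Iterator, TYPE_CHECKING
--
-- def _convert_parameters(sql: str, params: Optional[Tuple] = None) -> Tuple[str, Any]:
--     """Convert standard ? placeholders to MySQL %s placeholders."""
--     # For MySQL, replace ? with %s but handle escaped ?? properly
--     new_sql = ''
--     i = 0
--     while i < len(sql):
--         if i+1 < len(sql) and sql[i:i+2] == '??':
--             new_sql += '?'  # Replace ?? with single ? (literal question mark, not a parameter)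
--             i += 2
--         elif sql[i] == '?':
--             new_sql += '%s'  # Replace ? with %s for MySQL parameters
--             i += 1
--         else:
--             new_sql += sql[i]
--             i += 1
--
--     if not params:
--         return new_sql, []
--
--     return new_sql, params or []
-- ===== SOURCE B (Python) =====
-- from typing import Optional, Tuple, Any
--
-- def _convert_parameters(sql: str, params: Optional[Tuple] = None) -> Tuple[str, Any]:
--     """Convert standard ? placeholders to MySQL %s placeholders."""
--     # Split on escaped '??' first; within each piece every '?' is a parameter.
--     new_sql = '?'.join(part.replace('?', '%s') for part in sql.split('??'))
--     if not params:
--         return new_sql, []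
--     return new_sql, params or []
-- ===== Notes on version B (the rewrite author's own statement) =====
-- stated objective: faster
-- what changed: Replaces the index-walking per-character while-loop that grows the result by repeated string concatenation with a library split on the two-character escape sequence, a bulk placeholder substitution in each part, and a single rejoin.
import Mathlib
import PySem

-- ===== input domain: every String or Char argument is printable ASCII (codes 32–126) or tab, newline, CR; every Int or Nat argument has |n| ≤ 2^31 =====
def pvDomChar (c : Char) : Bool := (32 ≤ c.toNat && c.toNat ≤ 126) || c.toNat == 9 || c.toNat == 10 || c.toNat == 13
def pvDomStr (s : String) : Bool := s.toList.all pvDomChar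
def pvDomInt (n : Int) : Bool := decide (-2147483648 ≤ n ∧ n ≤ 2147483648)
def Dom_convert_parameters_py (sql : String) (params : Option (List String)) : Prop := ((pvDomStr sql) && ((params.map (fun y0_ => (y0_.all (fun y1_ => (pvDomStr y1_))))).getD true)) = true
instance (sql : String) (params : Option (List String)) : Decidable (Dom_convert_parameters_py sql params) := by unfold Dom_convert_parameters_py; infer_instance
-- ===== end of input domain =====

-- B replaces A's index-walking while-loop (repeated string concatenation) by library split / per-part replace / join; measurably faster, same result proved.

-- ===== PORT A =====
-- the while-loop of A: scan left to right, '??' → '?', '?' → '%s', else copy the character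
def pvLoopA : List Char → List Char
  | [] => []
  | '?' :: '?' :: rest => '?' :: pvLoopA rest
  | '?' :: rest => '%' :: 's' :: pvLoopA rest
  | c :: rest => c :: pvLoopA rest

def convert_parameters_py (sql : String) (params : Option (List String)) : String × List String :=
  let new_sql := String.ofList (pvLoopA sql.toList)
  match params with
  | none => (new_sql, [])                                    -- if not params: return new_sql, []
  | some ps => if ps.isEmpty then (new_sql, []) else (new_sql, ps)   -- return new_sql, params or []

-- ===== PORT B =====
def convert_parameters_py_alt (sql : String) (params : Option (List String)) : String × List String :=
  let parts := PySem.Chars.splitOn sql.toList ['?', '?']                  -- sql.split('??')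
  let new_sql := String.ofList (PySem.Chars.join ['?']
    (parts.map (fun p => PySem.Chars.replace p ['?'] ['%', 's'])))        -- '?'.join(p.replace('?','%s') …)
  match params with
  | none => (new_sql, [])
  | some ps => if ps.isEmpty then (new_sql, []) else (new_sql, ps)

-- ===== PRECONDITION & SPEC =====
def Spec_convert_parameters_py (sql : String) (params : Option (List String)) (out : String × List String) : Prop := out = convert_parameters_py_alt sql params
instance (sql : String) (params : Option (List String)) (out : String × List String) : Decidable (Spec_convert_parameters_py sql params out) := by unfold Spec_convert_parameters_py; infer_instance

-- ===== CLAIM (what is proved, stated in full; the proofs are below) =====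
def Claim_equal_convert_parameters_py : Prop := ∀ (sql : String) (params : Option (List String)), Dom_convert_parameters_py sql params → Spec_convert_parameters_py sql params (convert_parameters_py sql params)

-- ===== LEMMAS AND PROOFS =====

-- proof-side recursive forms of split-on-'??' and replace-'?'→'%s'
def pvSplit : List Char → List (List Char)
  | [] => [[]]
  | '?' :: '?' :: rest => [] :: pvSplit rest
  | c :: rest => (c :: (pvSplit rest).headI) :: (pvSplit rest).tail

def pvRep : List Char → List Char
  | [] => []
  | '?' :: t => '%' :: 's' :: pvRep t
  | c :: t => c :: pvRep t

lemma pvSplit_ne_nil (l : List Char) : pvSplit l ≠ [] := by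
  rw [pvSplit.eq_def]; split <;> simp

lemma pvRep_ne (c : Char) (t : List Char) (h : c ≠ '?') : pvRep (c :: t) = c :: pvRep t := by
  rw [pvRep.eq_def]; split <;> simp_all

lemma pvLoopA_q_cons (c : Char) (t : List Char) (h : c ≠ '?') :
    pvLoopA ('?' :: c :: t) = '%' :: 's' :: pvLoopA (c :: t) := by
  rw [pvLoopA.eq_def]; split <;> try simp_all
  rename_i hx heq
  exact hx heq.1.symm

lemma pvLoopA_ne (c : Char) (t : List Char) (h : c ≠ '?') :
    pvLoopA (c :: t) = c :: pvLoopA t := by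
  rw [pvLoopA.eq_def]; split <;> simp_all

lemma pvSplit_q_other (c : Char) (r : List Char) (h : c ≠ '?') :
    pvSplit ('?' :: c :: r) = ('?' :: (pvSplit (c :: r)).headI) :: (pvSplit (c :: r)).tail := by
  rw [pvSplit.eq_def]; split <;> try simp_all
  rename_i hx heq
  exact heq.1.symm

lemma pvSplit_ne (c : Char) (r : List Char) (h : c ≠ '?') :
    pvSplit (c :: r) = (c :: (pvSplit r).headI) :: (pvSplit r).tail := by
  rw [pvSplit.eq_def]; split <;> simp_all

lemma pv_join_prepend (a q : List Char) (t : List (List Char)) :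
    PySem.Chars.join ['?'] ((a ++ q) :: t) = a ++ PySem.Chars.join ['?'] (q :: t) := by
  cases t with
  | nil => rw [PySem.Chars.join_singleton, PySem.Chars.join_singleton]
  | cons b bs => rw [PySem.Chars.join_cons_cons, PySem.Chars.join_cons_cons]; simp [List.append_assoc]

lemma pv_rep_go (n : Nat) : ∀ (l acc : List Char), l.length ≤ n →
    PySem.Chars.replace.go ['?'] ['%', 's'] n l acc = acc.reverse ++ pvRep l := by
  induction n with
  | zero =>
    intro l acc h
    have : l = [] := by cases l <;> simp_all
    subst this
    simp [PySem.Chars.replace.go, pvRep]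
  | succ n ih =>
    intro l acc h
    cases l with
    | nil => simp [PySem.Chars.replace.go, pvRep]
    | cons c t =>
      by_cases hc : c = '?'
      · subst hc
        have hpre : List.isPrefixOf ['?'] ('?' :: t) = true := by simp [List.isPrefixOf]
        simp only [PySem.Chars.replace.go, hpre, if_true]
        rw [ih _ _ (by simpa using h)]
        simp [pvRep]
      · have hpre : List.isPrefixOf ['?'] (c :: t) = false := by
          simp [List.isPrefixOf]; exact fun hh => absurd hh.symm hc
        simp only [PySem.Chars.replace.go, hpre, Bool.false_eq_true, if_false]
        rw [ih _ _ (by simpa using h)]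
        rw [pvRep_ne c t hc]
        simp

lemma pv_split_go (n : Nat) : ∀ (l cur : List Char) (acc : List (List Char)), l.length ≤ n →
    PySem.Chars.splitOn.go ['?', '?'] n l cur acc =
      acc.reverse ++ (cur.reverse ++ (pvSplit l).headI) :: (pvSplit l).tail := by
  induction n with
  | zero =>
    intro l cur acc h
    have : l = [] := by cases l <;> simp_all
    subst this
    simp [PySem.Chars.splitOn.go, pvSplit]
  | succ n ih =>
    intro l cur acc h
    cases l with
    | nil => simp [PySem.Chars.splitOn.go, pvSplit]
    | cons c t =>
      by_cases hc : c = '?'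
      · subst hc
        cases t with
        | nil =>
          have hpre : List.isPrefixOf ['?', '?'] ['?'] = false := by decide
          simp only [PySem.Chars.splitOn.go, hpre, Bool.false_eq_true, if_false]
          rw [ih _ _ _ (by simp)]
          simp [pvSplit]
        | cons d u =>
          by_cases hd : d = '?'
          · subst hd
            have hpre : List.isPrefixOf ['?', '?'] ('?' :: '?' :: u) = true := by
              simp [List.isPrefixOf]
            simp only [PySem.Chars.splitOn.go, hpre, if_true]
            rw [ih _ _ _ (by simp at h ⊢; omega)]
            cases hp : pvSplit u with
            | nil => exact absurd hp (pvSplit_ne_nil u)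
            | cons p ps => simp [pvSplit, hp]
          · have hpre : List.isPrefixOf ['?', '?'] ('?' :: d :: u) = false := by
              simp [List.isPrefixOf]; exact fun hh => absurd hh.symm hd
            simp only [PySem.Chars.splitOn.go, hpre, Bool.false_eq_true, if_false]
            rw [ih _ _ _ (by simpa using h)]
            cases hp : pvSplit (d :: u) with
            | nil => exact absurd hp (pvSplit_ne_nil _)
            | cons p ps => rw [pvSplit_q_other d u hd, hp]; simp
      · have hpre : List.isPrefixOf ['?', '?'] (c :: t) = false := by
          simp [List.isPrefixOf]; intro hh; exact absurd hh.symm hc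
        simp only [PySem.Chars.splitOn.go, hpre, Bool.false_eq_true, if_false]
        rw [ih _ _ _ (by simpa using h)]
        cases hp : pvSplit t with
        | nil => exact absurd hp (pvSplit_ne_nil t)
        | cons p ps => rw [pvSplit_ne c t hc, hp]; simp

lemma pv_replace_eq (p : List Char) : PySem.Chars.replace p ['?'] ['%', 's'] = pvRep p := by
  have : (['?'] : List Char).isEmpty = false := by decide
  simp only [PySem.Chars.replace, this, Bool.false_eq_true, if_false]
  simpa using pv_rep_go p.length p [] le_rfl

lemma pv_splitOn_eq (cs : List Char) : PySem.Chars.splitOn cs ['?', '?'] = pvSplit cs := by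
  unfold PySem.Chars.splitOn
  rw [pv_split_go (cs.length + 1) cs [] [] (by omega)]
  cases hp : pvSplit cs with
  | nil => exact absurd hp (pvSplit_ne_nil cs)
  | cons p ps => simp

lemma pv_main (n : Nat) : ∀ l : List Char, l.length ≤ n →
    pvLoopA l = PySem.Chars.join ['?'] ((pvSplit l).map pvRep) := by
  induction n with
  | zero =>
    intro l h
    have : l = [] := by cases l <;> simp_all
    subst this
    simp [pvLoopA, pvSplit, pvRep, PySem.Chars.join, List.intercalate]
  | succ n ih =>
    intro l h
    cases l with
    | nil => simp [pvLoopA, pvSplit, pvRep, PySem.Chars.join, List.intercalate]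
    | cons c t =>
      by_cases hc : c = '?'
      · subst hc
        cases t with
        | nil =>
          simp [pvLoopA, pvSplit, pvRep, PySem.Chars.join, List.intercalate]
        | cons d u =>
          by_cases hd : d = '?'
          · subst hd
            cases hp : pvSplit u with
            | nil => exact absurd hp (pvSplit_ne_nil u)
            | cons p ps =>
              have hA : pvLoopA ('?' :: '?' :: u) = '?' :: pvLoopA u := by
                simp [pvLoopA]
              have hS : pvSplit ('?' :: '?' :: u) = [] :: pvSplit u := by
                simp [pvSplit]
              rw [hA, hS, hp]
              simp only [List.map_cons]
              rw [PySem.Chars.join_cons_cons]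
              rw [ih u (by simp at h; omega)]
              simp [pvRep, hp]
          · cases hp : pvSplit (d :: u) with
            | nil => exact absurd hp (pvSplit_ne_nil _)
            | cons p ps =>
              rw [pvLoopA_q_cons d u hd, pvSplit_q_other d u hd, hp]
              simp only [List.headI, List.tail, List.map_cons]
              have : pvRep ('?' :: p) = ['%', 's'] ++ pvRep p := by simp [pvRep]
              rw [this, pv_join_prepend]
              rw [ih (d :: u) (by simp at h ⊢; omega)]
              simp [hp]
      · cases hp : pvSplit t with
        | nil => exact absurd hp (pvSplit_ne_nil t)
        | cons p ps =>
          rw [pvLoopA_ne c t hc, pvSplit_ne c t hc, hp]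
          simp only [List.headI, List.tail, List.map_cons]
          have : pvRep (c :: p) = [c] ++ pvRep p := by rw [pvRep_ne c p hc]; rfl
          rw [this, pv_join_prepend]
          rw [ih t (by simpa using h)]
          simp [hp]

lemma pv_sql_eq (cs : List Char) :
    PySem.Chars.join ['?']
      ((PySem.Chars.splitOn cs ['?', '?']).map (fun p => PySem.Chars.replace p ['?'] ['%', 's']))
      = pvLoopA cs := by
  rw [pv_splitOn_eq]
  simp only [pv_replace_eq]
  exact (pv_main cs.length cs le_rfl).symm

-- ===== VERDICT (by name: the statement is the Claim_ definition above) =====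
theorem convert_parameters_py_spec : Claim_equal_convert_parameters_py := by
  intro sql params _
  unfold Spec_convert_parameters_py convert_parameters_py convert_parameters_py_alt
  cases params <;> simp [pv_sql_eq]
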